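-- pv_equiv track=rewrite | github.com/c10q/algorithm | python/0830_hmsc/ps2.py | solution
-- ===== SOURCE A (Python) =====
-- def solution(movie):
--     answer = []
--     temp = {}
--     for i in range(len(movie)):
--         if movie[i] not in temp:
--             temp[movie[i]] = 1
--         else:
--             temp[movie[i]] += 1
--
--     movies = {}
--
--     for i in temp:
--         if temp[i] not in movies:
--             movies[temp[i]] = [i]
--         else:
--             movies[temp[i]].append(i)
--
--
--     movies = sorted(movies.items(), key=lambda x: x[0], reverse=True)
--     for i in movies:
--         answer += sorted(i[1])
--
--     return answer
-- ===== SOURCE B (Python) =====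
-- def solution(movie):
--     counts = {}
--     for m in movie:
--         counts[m] = counts.get(m, 0) + 1
--     return sorted(counts, key=lambda m: (-counts[m], m))
-- ===== Notes on version B (the rewrite author's own statement) =====
-- stated objective: simpler
-- what changed: A builds a count dict, then a second count-to-list-of-names grouping dict, sorts its items by count descending and concatenates the per-count name-sorted lists; B builds only the count dict and produces the answer with one composite-key sort of the distinct names by (-count, name).
import Mathlib
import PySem

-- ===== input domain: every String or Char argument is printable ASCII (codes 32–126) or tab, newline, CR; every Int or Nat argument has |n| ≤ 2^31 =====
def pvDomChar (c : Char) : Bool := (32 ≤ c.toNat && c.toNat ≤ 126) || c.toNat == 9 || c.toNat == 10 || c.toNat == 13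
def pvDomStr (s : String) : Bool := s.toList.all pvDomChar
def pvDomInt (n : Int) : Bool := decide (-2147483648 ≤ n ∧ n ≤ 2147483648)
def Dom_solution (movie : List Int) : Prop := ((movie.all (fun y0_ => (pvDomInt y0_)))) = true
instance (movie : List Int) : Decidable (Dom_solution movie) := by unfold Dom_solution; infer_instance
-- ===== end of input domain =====

-- B replaces A's count-dict + count→names grouping dict + two-level sort by one composite-key
-- sort over the distinct names (objective: simpler; same asymptotic cost).

-- ===== PORT A =====
def solution (movie : List Int) : List Int :=
  -- answer = []; temp = {}; for i in range(len(movie)): if movie[i] not in temp: temp[movie[i]] = 1 else: temp[movie[i]] += 1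
  let temp : PySem.Dict Int Int :=
    (PySem.List.pyRange 0 (movie.length : Int) 1).foldl
      (fun temp i =>
        if temp.contains (PySem.List.pyGetD movie i 0) = false then
          temp.insert (PySem.List.pyGetD movie i 0) 1
        else
          temp.modify (PySem.List.pyGetD movie i 0) 0 (fun x => x + 1))
      PySem.Dict.empty
  -- movies = {}; for i in temp: if temp[i] not in movies: movies[temp[i]] = [i] else: movies[temp[i]].append(i)
  let movies : PySem.Dict Int (List Int) :=
    temp.keys.foldl
      (fun movies i =>
        if movies.contains (temp.getD i 0) = false then
          movies.insert (temp.getD i 0) [i]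
        else
          movies.modify (temp.getD i 0) [] (fun x => x ++ [i]))
      PySem.Dict.empty
  -- movies = sorted(movies.items(), key=lambda x: x[0], reverse=True)
  let moviesSorted := PySem.List.sorted movies.items (fun x => x.1) true
  -- for i in movies: answer += sorted(i[1])
  moviesSorted.foldl (fun answer i => answer ++ PySem.List.sorted i.2 (fun x => x) false) []

-- ===== PORT B =====
def solution_alt (movie : List Int) : List Int :=
  -- counts = {}; for m in movie: counts[m] = counts.get(m, 0) + 1
  let counts : PySem.Dict Int Int :=
    movie.foldl (fun counts m => counts.insert m (counts.getD m 0 + 1)) PySem.Dict.empty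
  -- return sorted(counts, key=lambda m: (-counts[m], m))
  PySem.List.sorted2 counts.keys (fun m => -(counts.getD m 0)) (fun m => m) false

-- ===== PRECONDITION & SPEC =====
def Spec_solution (movie : List Int) (out : List Int) : Prop := out = solution_alt movie
instance (movie : List Int) (out : List Int) : Decidable (Spec_solution movie out) := by unfold Spec_solution; infer_instance

-- ===== CLAIM (what is proved, stated in full; the proofs are below) =====
def Claim_equal_solution : Prop := ∀ (movie : List Int), Dom_solution movie → Spec_solution movie (solution movie)

-- ===== LEMMAS AND PROOFS =====

-- the strict lexicographic order induced by the composite key (k1, k2)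
def pvLex {α : Type} (k1 k2 : α → Int) (a b : α) : Prop :=
  k1 a < k1 b ∨ (k1 a = k1 b ∧ k2 a < k2 b)

-- the comparison boolean sorted2 uses
def pvBef {α : Type} (k1 k2 : α → Int) (a b : α) : Bool :=
  decide (k1 a < k1 b) || (!decide (k1 b < k1 a) && decide (k2 a < k2 b))

theorem pvBef_true_iff {α : Type} (k1 k2 : α → Int) (a b : α) :
    pvBef k1 k2 a b = true ↔ pvLex k1 k2 a b := by
  simp only [pvBef, pvLex, Bool.or_eq_true, Bool.and_eq_true, Bool.not_eq_true',
    decide_eq_true_eq, decide_eq_false_iff_not]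
  omega

theorem pvBef_false_iff {α : Type} (k1 k2 : α → Int) (a b : α) :
    pvBef k1 k2 a b = false ↔ ¬ pvLex k1 k2 a b := by
  rw [← Bool.not_eq_true, not_iff_not, pvBef_true_iff]

theorem pvInsertBy_pairwise {α : Type} (k1 k2 : α → Int) (x : α) (ys : List α)
    (h : ys.Pairwise (fun a b => ¬ pvLex k1 k2 b a)) :
    (PySem.List.insertBy (pvBef k1 k2) x ys).Pairwise (fun a b => ¬ pvLex k1 k2 b a) := by
  induction ys with
  | nil => simp [PySem.List.insertBy]
  | cons y ys ih =>
    rw [List.pairwise_cons] at h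
    by_cases hb : pvBef k1 k2 x y = true
    · have hxy := (pvBef_true_iff k1 k2 x y).mp hb
      simp only [PySem.List.insertBy, hb, if_pos]
      refine List.pairwise_cons.mpr ⟨?_, List.pairwise_cons.mpr h⟩
      intro z hz
      rcases List.mem_cons.mp hz with rfl | hz'
      · simp only [pvLex] at hxy ⊢; omega
      · have hyz := h.1 z hz'
        simp only [pvLex] at hxy hyz ⊢; omega
    · rw [Bool.not_eq_true] at hb
      have hxy := (pvBef_false_iff k1 k2 x y).mp hb
      simp only [PySem.List.insertBy, hb, Bool.false_eq_true, if_false]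
      refine List.pairwise_cons.mpr ⟨?_, ih h.2⟩
      intro z hz
      rcases (PySem.List.mem_insertBy _ _ _ _).mp hz with rfl | hz'
      · exact hxy
      · exact h.1 z hz'

theorem pvFoldl_insertBy_pairwise {α : Type} (k1 k2 : α → Int) (xs : List α) :
    ∀ acc : List α, acc.Pairwise (fun a b => ¬ pvLex k1 k2 b a) →
    (xs.foldl (fun acc x => PySem.List.insertBy (pvBef k1 k2) x acc) acc).Pairwise
      (fun a b => ¬ pvLex k1 k2 b a) := by
  induction xs with
  | nil => intro acc h; simpa using h
  | cons x xs ih =>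
    intro acc h
    exact ih _ (pvInsertBy_pairwise k1 k2 x acc h)

-- any strictly (k1, k2)-lexicographically increasing rearrangement of xs IS sorted2 xs k1 k2
theorem pvSorted2_eq_of_perm {α : Type} (k1 k2 : α → Int) (xs ys : List α)
    (hp : ys.Perm xs) (hs : ys.Pairwise (pvLex k1 k2)) :
    PySem.List.sorted2 xs k1 k2 = ys := by
  have hdef : PySem.List.sorted2 xs k1 k2 =
      xs.foldl (fun acc x => PySem.List.insertBy (pvBef k1 k2) x acc) [] := rfl
  rw [hdef]
  set R := xs.foldl (fun acc x => PySem.List.insertBy (pvBef k1 k2) x acc) [] with hR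
  have hperm : R.Perm xs := by
    have := PySem.List.foldl_insertBy_perm (pvBef k1 k2) xs []
    simpa [hR] using this
  have hRys : R.Perm ys := hperm.trans hp.symm
  have hRle : R.Pairwise (fun a b => ¬ pvLex k1 k2 b a) :=
    pvFoldl_insertBy_pairwise k1 k2 xs [] (by simp)
  have hysnd : (ys.map (fun a => (k1 a, k2 a))).Nodup := by
    refine List.pairwise_map.mpr (hs.imp ?_)
    intro a b hab
    simp only [pvLex] at hab
    simp only [Ne, Prod.mk.injEq, not_and]
    omega
  have hRnd : (R.map (fun a => (k1 a, k2 a))).Nodup :=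
    ((hRys.symm).map _).nodup hysnd
  have hRne : R.Pairwise (fun a b => (k1 a, k2 a) ≠ (k1 b, k2 b)) :=
    List.pairwise_map.mp hRnd
  have hRlt : R.Pairwise (pvLex k1 k2) := by
    refine (hRle.and hRne).imp ?_
    intro a b hab
    obtain ⟨h1, h2⟩ := hab
    simp only [pvLex, not_or, not_and, not_lt] at h1
    simp only [Ne, Prod.mk.injEq, not_and] at h2
    simp only [pvLex]
    omega
  refine List.Perm.eq_of_pairwise ?_ hRlt hs hRys
  intro a b _ _ h1 h2
  exfalso
  simp only [pvLex] at h1 h2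
  omega

-- abbreviations for the intermediate data of A
def pvCnt (movie : List Int) (i : Int) : Int := (movie.count i : Int)
def pvK (movie : List Int) : List Int := PySem.Set.ofList movie
def pvGroup (movie : List Int) (c : Int) : List Int :=
  (pvK movie).filter (fun i => pvCnt movie i == c)
def pvCs (movie : List Int) : List Int := PySem.Set.ofList ((pvK movie).map (pvCnt movie))
def pvItems (movie : List Int) : List (Int × List Int) :=
  (pvCs movie).map (fun c => (c, pvGroup movie c))
def pvAns (movie : List Int) : List Int :=
  (PySem.List.sorted (pvItems movie) (fun x => x.1) true).flatMap
    (fun p => PySem.List.sorted p.2 (fun x => x) false)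

theorem pv_solution_eq (movie : List Int) : solution movie = pvAns movie := by
  unfold solution
  have h1 : (PySem.List.pyRange 0 (movie.length : Int) 1).foldl
      (fun (temp : PySem.Dict Int Int) i =>
        if temp.contains (PySem.List.pyGetD movie i 0) = false then
          temp.insert (PySem.List.pyGetD movie i 0) 1
        else
          temp.modify (PySem.List.pyGetD movie i 0) 0 (fun x => x + 1))
      PySem.Dict.empty
      = PySem.Dict.counter movie := by
    have ha : (PySem.List.pyRange 0 (movie.length : Int) 1).foldl
        (fun (temp : PySem.Dict Int Int) i =>
          if temp.contains (PySem.List.pyGetD movie i 0) = false then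
            temp.insert (PySem.List.pyGetD movie i 0) 1
          else
            temp.modify (PySem.List.pyGetD movie i 0) 0 (fun x => x + 1))
        PySem.Dict.empty
        = movie.foldl
            (fun (temp : PySem.Dict Int Int) x =>
              if temp.contains x = false then temp.insert x 1
              else temp.modify x 0 (fun v => v + 1)) PySem.Dict.empty :=
      PySem.List.foldl_pyRange_zero_pyGetD' movie 0
        (fun (temp : PySem.Dict Int Int) x =>
          if temp.contains x = false then temp.insert x 1
          else temp.modify x 0 (fun v => v + 1)) PySem.Dict.empty
    rw [ha, PySem.Dict.counter_eq_foldl]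
    congr 1
    funext d x
    by_cases hc : d.contains x = true
    · simp [hc]
    · rw [Bool.not_eq_true] at hc
      simp [hc, PySem.Dict.modify, PySem.Dict.getD_of_not_contains d 0 hc]
  simp only []
  rw [h1, PySem.Dict.keys_counter]
  simp only [PySem.Dict.getD_counter]
  have h2 : (PySem.Set.ofList movie).foldl
      (fun (movies : PySem.Dict Int (List Int)) i =>
        if movies.contains ((movie.count i : Int)) = false then
          movies.insert ((movie.count i : Int)) [i]
        else
          movies.modify ((movie.count i : Int)) [] (fun x => x ++ [i]))
      PySem.Dict.empty
      = (pvK movie).foldl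
          (fun (movies : PySem.Dict Int (List Int)) i =>
            movies.modify (pvCnt movie i) [] (fun x => x ++ [i])) PySem.Dict.empty := by
    unfold pvK pvCnt
    congr 1
    funext d i
    by_cases hc : d.contains ((movie.count i : Int)) = true
    · simp [hc]
    · rw [Bool.not_eq_true] at hc
      simp [hc, PySem.Dict.modify, PySem.Dict.getD_of_not_contains d [] hc]
  rw [h2]
  set M := (pvK movie).foldl
      (fun (movies : PySem.Dict Int (List Int)) i =>
        movies.modify (pvCnt movie i) [] (fun x => x ++ [i])) PySem.Dict.empty with hM
  have hkeys : M.keys = pvCs movie := by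
    rw [hM]
    have := PySem.Dict.keys_foldl_modify_key (pvK movie) (pvCnt movie) ([] : List Int)
      (fun _ i v => v ++ [i]) PySem.Dict.empty
    rw [this]
    simp [PySem.Dict.keys_empty, PySem.Set.update_nil_left, pvCs]
  have hgd : ∀ c : Int, M.getD c [] = pvGroup movie c := by
    intro c
    have hMm : M = ((pvK movie).map (fun i => (pvCnt movie i, i))).foldl
        (fun (d : PySem.Dict Int (List Int)) p => d.modify p.1 [] (fun x => x ++ [p.2]))
        PySem.Dict.empty := by
      rw [hM, List.foldl_map]
    rw [hMm, PySem.Dict.getD_foldl_modify_append, PySem.Dict.getD_empty]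
    rw [List.filter_map, List.map_map]
    simp only [List.nil_append]
    have hpred : ((fun p : Int × Int => p.1 == c) ∘ fun i => (pvCnt movie i, i))
        = fun i => pvCnt movie i == c := rfl
    rw [hpred]
    have hmid : ((fun p : Int × Int => p.2) ∘ fun i => (pvCnt movie i, i))
        = fun i => i := rfl
    rw [hmid, List.map_id']
    rfl
  have hitems : M.items = pvItems movie := by
    have hnd : M.keys.Nodup := by
      rw [hkeys]; exact PySem.Set.nodup_ofList _
    rw [PySem.Dict.items_eq_map_keys M hnd ([] : List Int), hkeys]
    simp only [hgd]
    rfl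
  rw [hitems]
  rw [PySem.List.foldl_append_eq_flatMap]
  simp [pvAns]

theorem pv_alt_eq (movie : List Int) :
    solution_alt movie
      = PySem.List.sorted2 (pvK movie) (fun m => -(pvCnt movie m)) (fun m => m) := by
  unfold solution_alt
  simp only []
  rw [PySem.Dict.foldl_insert_getD_add_one_eq_counter, PySem.Dict.keys_counter]
  simp only [PySem.Dict.getD_counter]
  rfl

-- a Nodup list of values covering every cnt-value of K chops K into its fibers
theorem pv_flatMap_filter_perm (cnt : Int → Int) :
    ∀ (cs K : List Int), cs.Nodup → (∀ i ∈ K, cnt i ∈ cs) →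
    (cs.flatMap (fun c => K.filter (fun i => cnt i == c))).Perm K := by
  intro cs
  induction cs with
  | nil =>
    intro K _ h
    cases K with
    | nil => simp
    | cons a t => exact absurd (h a (by simp)) (by simp)
  | cons c rest ih =>
    intro K hnd hmem
    have hndc := List.nodup_cons.mp hnd
    rw [List.flatMap_cons]
    have hcongr : ∀ c' ∈ rest,
        K.filter (fun i => cnt i == c')
          = (K.filter (fun i => !(cnt i == c))).filter (fun i => cnt i == c') := by
      intro c' hc'
      rw [List.filter_filter]
      refine (List.filter_congr ?_)
      intro i _
      have hne : c' ≠ c := by rintro rfl; exact hndc.1 hc'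
      by_cases h : cnt i = c'
      · simp [h, hne]
      · simp [h]
    have hfm : rest.flatMap (fun c' => K.filter (fun i => cnt i == c'))
        = rest.flatMap (fun c' =>
            (K.filter (fun i => !(cnt i == c))).filter (fun i => cnt i == c')) := by
      simp only [List.flatMap_def]
      exact congrArg List.flatten (List.map_congr_left hcongr)
    rw [hfm]
    have hIH := ih (K.filter (fun i => !(cnt i == c))) hndc.2 ?_
    · exact (List.Perm.append_left _ hIH).trans (List.filter_append_perm _ K)
    · intro i hi
      rw [List.mem_filter] at hi
      have := hmem i hi.1
      rcases List.mem_cons.mp this with h | h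
      · exfalso; simp [h] at hi
      · exact h

theorem pv_mem_group (movie : List Int) (c i : Int) (h : i ∈ pvGroup movie c) :
    pvCnt movie i = c := by
  rw [pvGroup, List.mem_filter] at h
  exact beq_iff_eq.mp h.2

theorem pv_ans_perm (movie : List Int) : (pvAns movie).Perm (pvK movie) := by
  unfold pvAns
  have h1 : ((PySem.List.sorted (pvItems movie) (fun x => x.1) true).flatMap
        (fun p => PySem.List.sorted p.2 (fun x => x) false)).Perm
      ((pvItems movie).flatMap (fun p => PySem.List.sorted p.2 (fun x => x) false)) :=
    List.Perm.flatMap_right _ (PySem.List.sorted_perm _ _ _)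
  have h2 : ((pvItems movie).flatMap
        (fun p => PySem.List.sorted p.2 (fun x => x) false)).Perm
      ((pvItems movie).flatMap (fun p => p.2)) :=
    List.Perm.flatMap_left _ (fun p _ => PySem.List.sorted_perm _ _ _)
  have h3 : (pvItems movie).flatMap (fun p => p.2)
      = (pvCs movie).flatMap (fun c => (pvK movie).filter (fun i => pvCnt movie i == c)) := by
    unfold pvItems
    simp only [List.flatMap_def, List.map_map]
    rfl
  refine (h1.trans h2).trans ?_
  rw [h3]
  refine pv_flatMap_filter_perm (pvCnt movie) (pvCs movie) (pvK movie)
    (PySem.Set.nodup_ofList _) ?_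
  intro i hi
  unfold pvCs
  rw [PySem.Set.mem_ofList]
  exact List.mem_map_of_mem hi

theorem pv_ans_pairwise (movie : List Int) :
    (pvAns movie).Pairwise (pvLex (fun m => -(pvCnt movie m)) (fun m => m)) := by
  unfold pvAns
  rw [List.flatMap_def, List.pairwise_flatten]
  set S := PySem.List.sorted (pvItems movie) (fun x => x.1) true with hS
  have hSmem : ∀ p ∈ S, p.2 = pvGroup movie p.1 := by
    intro p hp
    have : p ∈ pvItems movie := (PySem.List.sorted_perm _ _ _).mem_iff.mp hp
    rcases List.mem_map.mp this with ⟨c, _, rfl⟩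
    rfl
  constructor
  · -- within each block: count is constant, names strictly increase
    intro l hl
    rcases List.mem_map.mp hl with ⟨p, hp, rfl⟩
    have hgrp := hSmem p hp
    have hnd : (PySem.List.sorted p.2 (fun x => x) false).Nodup := by
      refine (PySem.List.sorted_perm p.2 (fun x => x) false).symm.nodup ?_
      rw [hgrp]
      exact (PySem.Set.nodup_ofList movie).filter _
    have hle : (PySem.List.sorted p.2 (fun x => x) false).Pairwise
        (fun a b => (fun x => x) a ≤ (fun x => x) b) :=
      PySem.List.sorted_pairwise p.2 (fun x => x)
    have hcnt : ∀ x ∈ PySem.List.sorted p.2 (fun x => x) false, pvCnt movie x = p.1 := by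
      intro x hx
      have : x ∈ p.2 := (PySem.List.sorted_perm _ _ _).mem_iff.mp hx
      rw [hgrp] at this
      exact pv_mem_group movie p.1 x this
    refine (hle.and hnd).imp_of_mem ?_
    intro a b ha hb hab
    obtain ⟨h1, h2⟩ := hab
    right
    refine ⟨?_, ?_⟩
    · show -pvCnt movie a = -pvCnt movie b
      rw [hcnt a ha, hcnt b hb]
    · show a < b
      simp only at h1
      omega
  · -- across blocks: counts strictly decrease, so -count strictly increases
    have hfst : S.Pairwise (fun p q => q.1 ≤ p.1) :=
      PySem.List.sorted_pairwise_rev (pvItems movie) (fun x => x.1)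
    have hfstnd : (S.map (fun p => p.1)).Nodup := by
      refine ((PySem.List.sorted_perm (pvItems movie) (fun x => x.1) true).symm.map _).nodup ?_
      have : (pvItems movie).map (fun p => p.1) = pvCs movie := by
        unfold pvItems
        rw [List.map_map]
        exact List.map_id' _
      rw [this]
      exact PySem.Set.nodup_ofList _
    have hne : S.Pairwise (fun p q => p.1 ≠ q.1) := List.pairwise_map.mp hfstnd
    have hlt : S.Pairwise (fun p q => q.1 < p.1) := by
      refine (hfst.and hne).imp ?_
      intro p q h
      omega
    rw [List.pairwise_map]
    refine hlt.imp_of_mem ?_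
    intro p q hp hq hpq x hx y hy
    left
    have hxc : pvCnt movie x = p.1 := by
      have : x ∈ p.2 := (PySem.List.sorted_perm _ _ _).mem_iff.mp hx
      rw [hSmem p hp] at this
      exact pv_mem_group movie p.1 x this
    have hyc : pvCnt movie y = q.1 := by
      have : y ∈ q.2 := (PySem.List.sorted_perm _ _ _).mem_iff.mp hy
      rw [hSmem q hq] at this
      exact pv_mem_group movie q.1 y this
    show -pvCnt movie x < -pvCnt movie y
    omega

-- ===== VERDICT (by name: the statement is the Claim_ definition above) =====
theorem solution_spec : Claim_equal_solution := by
  unfold Claim_equal_solution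
  intro movie _
  unfold Spec_solution
  rw [pv_solution_eq, pv_alt_eq]
  exact (pvSorted2_eq_of_perm _ _ _ _ (pv_ans_perm movie) (pv_ans_pairwise movie)).symm
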